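-- pv_equiv track=rewrite | github.com/ICalofir/FMI-UB-2015 | An III Sem I/cava/Laboratoare/Proiect1_Python/src/adaugaPieseMozaicHexagonPeCaroiaj.py | getCuloareMedieMin
-- ===== SOURCE A (Python) =====
-- def euclDist(v1, v2):
--   sum = 0
--   for i in range(len(v1)):
--     sum += ((v1[i] - v2[i]) * (v1[i] - v2[i]))
--
--   return sum
--
-- def getCuloareMedieMin(vImg, vPiese):
--   dists = []
--   pos = []
--   for i in range(0, len(vPiese)):
--     dist = euclDist(vImg, vPiese[i])
--     dists.append(dist)
--     pos.append(i)
--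
--   minPos = [x for _, x in sorted(zip(dists, pos), key=lambda pair: pair[0])]
--   return minPos
-- ===== SOURCE B (Python) =====
-- def getCuloareMedieMin(vImg, vPiese):
--   # Online insertion sort: one pass over the pieces, keeping `order` (a list of
--   # (distance, index) pairs) sorted by distance at all times; ties keep arrival
--   # (= ascending index) order because each new pair goes after all pairs with
--   # distance <= its own.  No call to sorted(), no separate dists/pos lists.
--   order = []
--   for i, piesa in enumerate(vPiese):
--     d = 0
--     for a, b in zip(vImg, piesa):
--       d += (a - b) * (a - b)
--     j = 0
--     while j < len(order) and order[j][0] <= d: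
--       j += 1
--     order.insert(j, (d, i))
--   return [i for _, i in order]
-- ===== Notes on version B (the rewrite author's own statement) =====
-- stated objective: alternative
-- what changed: Replaces A's staged pipeline (build parallel dists/pos lists, zip them, call the library sort, project) with an online insertion sort: one pass over the pieces that inserts each (distance, index) pair into an accumulator kept sorted at all times, so no sorted() call and no parallel lists exist; it trades Timsort's O(n log n) sort stage for O(n^2) worst-case insertions.
-- outside the precondition, e.g. on getCuloareMedieMin([1, 2], [[3]]): A raises IndexError, B returns [0]
import Mathlib
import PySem

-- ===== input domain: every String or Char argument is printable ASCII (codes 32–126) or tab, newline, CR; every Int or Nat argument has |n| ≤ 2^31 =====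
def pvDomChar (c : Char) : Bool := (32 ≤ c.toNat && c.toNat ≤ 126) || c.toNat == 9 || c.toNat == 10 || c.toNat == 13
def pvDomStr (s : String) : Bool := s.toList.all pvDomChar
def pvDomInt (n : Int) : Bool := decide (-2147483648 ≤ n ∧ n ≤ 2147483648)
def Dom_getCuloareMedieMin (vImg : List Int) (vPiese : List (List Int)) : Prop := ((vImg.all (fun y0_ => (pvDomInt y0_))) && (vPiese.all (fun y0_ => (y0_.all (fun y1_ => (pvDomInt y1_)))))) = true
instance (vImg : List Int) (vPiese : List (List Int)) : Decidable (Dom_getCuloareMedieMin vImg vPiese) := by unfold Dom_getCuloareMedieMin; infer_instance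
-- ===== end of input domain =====

-- B replaces A's staged pipeline (parallel dists/pos lists, zip, library sort, projection) with
-- an online insertion sort: one pass inserting each (distance, index) pair into an accumulator
-- kept sorted by distance (objective: alternative algorithm, same result).

-- ===== PORT A =====
-- euclDist: sum of squared componentwise differences, indexed over range(len(v1))
def euclDist (v1 : List Int) (v2 : List Int) : Int :=
  (PySem.List.pyRange 0 (v1.length : Int) 1).foldl
    (fun s i => s + ((PySem.List.pyGetD v1 i 0 - PySem.List.pyGetD v2 i 0) *
                     (PySem.List.pyGetD v1 i 0 - PySem.List.pyGetD v2 i 0))) 0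

def getCuloareMedieMin (vImg : List Int) (vPiese : List (List Int)) : List Int :=
  let dp := (PySem.List.pyRange 0 (vPiese.length : Int) 1).foldl
    (fun (dp : List Int × List Int) i =>
      (dp.1 ++ [euclDist vImg (PySem.List.pyGetD vPiese i [])], dp.2 ++ [i])) ([], [])
  (PySem.List.sorted (dp.1.zip dp.2) (fun pair => pair.1) false).map (fun pair => pair.2)

-- ===== PORT B =====
-- Source B's while loop walks `order` from the front past every pair with distance <= d and
-- inserts (d, i) there; `insOrd` is that scan-and-insert as structural recursion.
def insOrd (d : Int) (i : Int) : List (Int × Int) → List (Int × Int)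
  | [] => [(d, i)]
  | y :: ys => if y.1 ≤ d then y :: insOrd d i ys else (d, i) :: y :: ys

def getCuloareMedieMin_alt (vImg : List Int) (vPiese : List (List Int)) : List Int :=
  ((PySem.List.enumerate vPiese).foldl
    (fun (order : List (Int × Int)) ip =>
      insOrd ((vImg.zip ip.2).foldl (fun s q => s + (q.1 - q.2) * (q.1 - q.2)) 0) ip.1 order)
    []).map (fun pair => pair.2)

-- ===== PRECONDITION & SPEC =====
-- Pre_ excludes exactly the inputs where A raises IndexError: some piece shorter than vImg.
def Pre_getCuloareMedieMin (vImg : List Int) (vPiese : List (List Int)) : Prop :=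
  ∀ p ∈ vPiese, vImg.length ≤ p.length
instance (vImg : List Int) (vPiese : List (List Int)) : Decidable (Pre_getCuloareMedieMin vImg vPiese) := by unfold Pre_getCuloareMedieMin; infer_instance

def pvWitness_getCuloareMedieMin : List Int × List (List Int) := ([1, 2], [[0, 0], [3, 1, 4]])

def Spec_getCuloareMedieMin (vImg : List Int) (vPiese : List (List Int)) (out : List Int) : Prop := out = getCuloareMedieMin_alt vImg vPiese
instance (vImg : List Int) (vPiese : List (List Int)) (out : List Int) : Decidable (Spec_getCuloareMedieMin vImg vPiese out) := by unfold Spec_getCuloareMedieMin; infer_instance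

-- ===== CLAIM (what is proved, stated in full; the proofs are below) =====
def Claim_equal_getCuloareMedieMin : Prop := ∀ (vImg : List Int) (vPiese : List (List Int)), Dom_getCuloareMedieMin vImg vPiese → Pre_getCuloareMedieMin vImg vPiese → Spec_getCuloareMedieMin vImg vPiese (getCuloareMedieMin vImg vPiese)

-- ===== LEMMAS AND PROOFS =====

-- PySem's stable insertion step (comparison on the first component) IS B's insOrd
lemma insertBy_eq_insOrd (x : Int × Int) (acc : List (Int × Int)) :
    PySem.List.insertBy (fun a b : Int × Int => decide (a.1 < b.1)) x acc
      = insOrd x.1 x.2 acc := by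
  induction acc with
  | nil => simp [PySem.List.insertBy, insOrd]
  | cons y ys ih =>
    simp only [PySem.List.insertBy, insOrd]
    split_ifs with h1 h2 <;> simp_all; omega

-- euclDist equals the zip-based fold when the second list is long enough
lemma euclDist_eq_zipSum (v1 v2 : List Int) (h : v1.length ≤ v2.length) :
    euclDist v1 v2 = (v1.zip v2).foldl (fun s q => s + (q.1 - q.2) * (q.1 - q.2)) 0 := by
  unfold euclDist
  rw [PySem.List.pyRange_zero_nat, List.foldl_map,
      PySem.List.foldl_add (List.range v1.length)
        (fun k => (PySem.List.pyGetD v1 (k : Int) 0 - PySem.List.pyGetD v2 (k : Int) 0) *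
                  (PySem.List.pyGetD v1 (k : Int) 0 - PySem.List.pyGetD v2 (k : Int) 0)) 0,
      PySem.List.foldl_add (v1.zip v2) (fun q => (q.1 - q.2) * (q.1 - q.2)) 0]
  simp only [zero_add]
  congr 1
  apply List.ext_getElem
  · simp [Nat.min_eq_left h]
  · intro k hk1 hk2
    simp only [List.getElem_map, List.getElem_range, List.getElem_zip, PySem.List.pyGetD_natCast]
    have hk : k < v1.length := by simpa using hk1
    rw [List.getD_eq_getElem v1 0 hk, List.getD_eq_getElem v2 0 (lt_of_lt_of_le hk h)]

-- the list of pairs A sorts is exactly the list of pairs B inserts, under Pre_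
lemma pairLists_eq (vImg : List Int) (vPiese : List (List Int))
    (hpre : Pre_getCuloareMedieMin vImg vPiese) :
    (PySem.List.pyRange 0 (vPiese.length : Int) 1).map
        (fun i => (euclDist vImg (PySem.List.pyGetD vPiese i []), i))
      = (PySem.List.enumerate vPiese).map
          (fun ip => ((vImg.zip ip.2).foldl (fun s q => s + (q.1 - q.2) * (q.1 - q.2)) 0, ip.1)) := by
  rw [PySem.List.enumerate_eq_map_pyRange (xs := vPiese) (d := ([] : List Int)), List.map_map]
  apply List.map_congr_left
  intro i hi
  rcases (PySem.List.mem_pyRange_one).1 hi with ⟨h0, hlt⟩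
  simp only [Function.comp]
  congr 1
  apply euclDist_eq_zipSum
  have hi' : i = ((i.toNat : Nat) : Int) := by omega
  rw [hi', PySem.List.pyGetD_natCast]
  have hk : i.toNat < vPiese.length := by omega
  rw [List.getD_eq_getElem vPiese [] hk]
  exact hpre _ (List.getElem_mem hk)

-- ===== VERDICT (by name: the statement is the Claim_ definition above) =====
theorem getCuloareMedieMin_spec : Claim_equal_getCuloareMedieMin := by
  intro vImg vPiese _ hpre
  unfold Spec_getCuloareMedieMin getCuloareMedieMin getCuloareMedieMin_alt
  set l := PySem.List.pyRange 0 (vPiese.length : Int) 1 with hl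
  have hfold : l.foldl
      (fun (dp : List Int × List Int) i =>
        (dp.1 ++ [euclDist vImg (PySem.List.pyGetD vPiese i [])], dp.2 ++ [i])) ([], [])
      = (l.map (fun i => euclDist vImg (PySem.List.pyGetD vPiese i [])), l) := by
    rw [PySem.List.foldl_prod_mk
      (fun s i => s ++ [euclDist vImg (PySem.List.pyGetD vPiese i [])])
      (fun s i => s ++ [i]) l [] []]
    rw [PySem.List.foldl_append_singleton_eq_map, PySem.List.foldl_append_singleton_eq_map]
    simp
  simp only [hfold]
  have hzip : (l.map (fun i => euclDist vImg (PySem.List.pyGetD vPiese i []))).zip l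
      = l.map (fun i => (euclDist vImg (PySem.List.pyGetD vPiese i []), i)) := by
    have h := @List.zip_map' Int Int Int
      (fun i => euclDist vImg (PySem.List.pyGetD vPiese i [])) id l
    simpa using h
  rw [hzip]
  congr 1
  -- A's library sort is the foldl of PySem's stable insertion, which is insOrd
  rw [PySem.List.sorted_eq_foldl_insertBy]
  have hins : ∀ (xs : List (Int × Int)) (acc : List (Int × Int)),
      xs.foldl (fun acc x =>
          PySem.List.insertBy (fun a b : Int × Int => decide ((fun p : Int × Int => p.1) a < (fun p : Int × Int => p.1) b)) x acc) acc
        = xs.foldl (fun acc x => insOrd x.1 x.2 acc) acc := by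
    intro xs
    induction xs with
    | nil => intro acc; rfl
    | cons x xs ih => intro acc; simp only [List.foldl_cons, insertBy_eq_insOrd]
  rw [hins, pairLists_eq vImg vPiese hpre, List.foldl_map]
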